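-- pv_equiv track=rewrite | github.com/christofmuc/KnobKraft-orm | adaptations/Elektron_AnalogRytm.py | escapeSysexElektron
-- ===== SOURCE A (Python) =====
-- from typing import Optional, List, Tuple
--
-- def escapeSysexElektron(data: List[int]) -> Tuple[List[int], int]:
--     result = []
--     chksum = 0
--     data_index = 0
--
--     while data_index < len(data):
--         ms_bits = 0
--
--         for i in range(7):
--             if data_index + i < len(data):
--                 ms_bits |= ((data[data_index + i] & 0x80) >> 7) << i
--         result.append(ms_bits)
--         chksum += ms_bits
--         for i in range(7):
--             if data_index < len(data):
--                 result.append(data[data_index] & 0x7f)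
--                 chksum += result[-1]
--                 data_index += 1
--     return result, chksum
-- ===== SOURCE B (Python) =====
-- def escapeSysexElektron(data):
--     chunks = []
--     i = 0
--     while i < len(data):
--         chunks.append(data[i:i + 7])
--         i += 7
--     result = []
--     for chunk in chunks:
--         result.append(sum(((b & 0x80) >> 7) << j for j, b in enumerate(chunk)))
--         result.extend(b & 0x7f for b in chunk)
--     return result, sum(result)
-- ===== Notes on version B (the rewrite author's own statement) =====
-- stated objective: alternative
-- what changed: B first splits the input into 7-byte chunks, builds each output block (MS-bits byte via an enumerate-sum, then the masked low bytes), and computes the checksum in a separate final sum(result) pass, replacing A's manual data_index cursor, guarded bit-OR loop and running checksum.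
import Mathlib
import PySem

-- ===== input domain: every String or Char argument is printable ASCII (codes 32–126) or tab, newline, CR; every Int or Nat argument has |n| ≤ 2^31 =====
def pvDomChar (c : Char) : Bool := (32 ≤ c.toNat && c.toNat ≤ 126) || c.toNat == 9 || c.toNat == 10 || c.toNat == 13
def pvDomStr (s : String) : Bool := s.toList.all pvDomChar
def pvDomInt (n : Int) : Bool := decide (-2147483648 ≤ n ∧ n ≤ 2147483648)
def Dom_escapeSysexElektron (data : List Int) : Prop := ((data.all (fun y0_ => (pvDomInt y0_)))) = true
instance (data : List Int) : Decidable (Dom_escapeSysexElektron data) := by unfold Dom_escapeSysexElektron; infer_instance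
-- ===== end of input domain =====

-- B re-implements the encoder by a separate chunking pass, per-chunk block building
-- and a final sum(result) checksum pass, replacing A's manual data_index cursor and
-- running checksum (objective: alternative decomposition; return value only).


-- ===== PORT A =====
-- first inner loop: ms_bits |= ((data[data_index+i] & 0x80) >> 7) << i  for i in range(7) (guarded)
def escA_ms (rest : List Int) : Int :=
  (List.range 7).foldl
    (fun m i => if i < rest.length then
        PySem.Int.bor m (((PySem.Int.band (rest.getD i 0) 128) >>> 7) <<< i)
      else m) 0

-- second inner loop: append data[data_index] & 0x7f and advance the cursor, 7 times (guarded);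
-- state = (result, chksum, unread suffix of data at the cursor)
def escA_inner (s : List Int × Int × List Int) : List Int × Int × List Int :=
  (List.range 7).foldl
    (fun s _ => match s.2.2 with
      | [] => s
      | b :: bs => (s.1 ++ [PySem.Int.band b 127], s.2.1 + PySem.Int.band b 127, bs)) s

-- escA_inner consumes exactly min 7 elements of the suffix (cited by escA_loop's decreasing_by)
theorem escA_inner_spec (rest result : List Int) (chksum : Int) :
    escA_inner (result, chksum, rest) =
      (result ++ (rest.take 7).map (fun b => PySem.Int.band b 127),
       chksum + ((rest.take 7).map (fun b => PySem.Int.band b 127)).sum,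
       rest.drop 7) := by
  rcases rest with _ | ⟨a1, _ | ⟨a2, _ | ⟨a3, _ | ⟨a4, _ | ⟨a5, _ | ⟨a6, _ | ⟨a7, t⟩⟩⟩⟩⟩⟩⟩ <;>
    simp [escA_inner, List.range_succ] <;> ring

-- the while loop, structural on the unread suffix
def escA_loop (rest result : List Int) (chksum : Int) : List Int × Int :=
  match rest with
  | [] => (result, chksum)
  | b :: bs =>
    let ms := escA_ms (b :: bs)
    let s := escA_inner (result ++ [ms], chksum + ms, b :: bs)
    escA_loop s.2.2 s.1 s.2.1
termination_by rest.length
decreasing_by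
  simp [escA_inner_spec]

def escapeSysexElektron (data : List Int) : List Int × Int :=
  escA_loop data [] 0

-- ===== PORT B =====
-- chunks: while i < len(data): chunks.append(data[i:i+7]); i += 7
def altChunks (data : List Int) (i : Nat) : List (List Int) :=
  if i < data.length then
    PySem.List.slice data (some (i : Int)) (some ((i : Int) + 7)) :: altChunks data (i + 7)
  else []
termination_by data.length - i

-- sum(((b & 0x80) >> 7) << j for j, b in enumerate(chunk))
def altMs (chunk : List Int) : Int :=
  ((PySem.List.enumerate chunk 0).map
    (fun p => ((PySem.Int.band p.2 128) >>> 7) <<< p.1.toNat)).sum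

def escapeSysexElektron_alt (data : List Int) : List Int × Int :=
  let chunks := altChunks data 0
  let result := chunks.foldl
    (fun acc chunk => (acc ++ [altMs chunk]) ++ chunk.map (fun b => PySem.Int.band b 127)) []
  (result, result.sum)

-- ===== PRECONDITION & SPEC =====
def Spec_escapeSysexElektron (data : List Int) (out : List Int × Int) : Prop := out = escapeSysexElektron_alt data
instance (data : List Int) (out : List Int × Int) : Decidable (Spec_escapeSysexElektron data out) := by unfold Spec_escapeSysexElektron; infer_instance

-- ===== CLAIM (what is proved, stated in full; the proofs are below) =====
def Claim_equal_escapeSysexElektron : Prop := ∀ (data : List Int), Dom_escapeSysexElektron data → Spec_escapeSysexElektron data (escapeSysexElektron data)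

-- ===== LEMMAS AND PROOFS =====

-- canonical chunk decomposition both ports are reduced to
def chunks7 : List Int → List (List Int)
  | [] => []
  | b :: bs => (b :: bs.take 6) :: chunks7 (bs.drop 6)
termination_by l => l.length
decreasing_by simp

theorem chunks7_cons_eq (l : List Int) (h : l ≠ []) :
    chunks7 l = l.take 7 :: chunks7 (l.drop 7) := by
  rcases l with _ | ⟨b, bs⟩
  · exact absurd rfl h
  · simp [chunks7]

-- positional sum of high bits
def msS : List Int → Nat → Int
  | [], _ => 0
  | b :: bs, k => ((PySem.Int.band b 128) >>> 7) <<< k + msS bs (k + 1)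

-- structural form of A's ms_bits fold
def msF : List Int → Nat → Int → Int
  | [], _, m => m
  | b :: bs, k, m => msF bs (k + 1) (PySem.Int.bor m (((PySem.Int.band b 128) >>> 7) <<< k))

theorem band128_cases (b : Int) : PySem.Int.band b 128 = 0 ∨ PySem.Int.band b 128 = 128 := by
  have h : ∀ n : Nat, n &&& 128 = 0 ∨ n &&& 128 = 128 := by
    intro n
    have := Nat.and_two_pow n 7
    norm_num at this
    cases hb : n.testBit 7 <;> simp [hb] at this <;> omega
  unfold PySem.Int.band
  split_ifs with h1 h2 h2
  · rw [show (128:Int).toNat = 128 from rfl]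
    rcases h b.toNat with hc | hc <;> rw [hc] <;> norm_num
  · omega
  · rw [show (128:Int).toNat = 128 from rfl, Nat.and_comm 128]
    rcases h ((-b - 1).toNat) with hc | hc <;> rw [hc] <;> norm_num
  · omega

theorem bit01 (b : Int) :
    (PySem.Int.band b 128) >>> 7 = 0 ∨ (PySem.Int.band b 128) >>> 7 = 1 := by
  rcases band128_cases b with h | h <;> rw [h] <;> [left; right] <;> decide

theorem bor_disjoint (m t : Int) (k : Nat) (hm : 0 ≤ m) (hlt : m < 2 ^ k)
    (ht : t = 0 ∨ t = 1) : PySem.Int.bor m (t <<< k) = m + t <<< k := by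
  rcases ht with rfl | rfl
  · simp [Int.shiftLeft_eq]
  · have h2 : (1 : Int) <<< k = (2 : Int) ^ k := by simp [Int.shiftLeft_eq]
    rw [h2]
    have hp : (2 : Int) ^ k = ((2 ^ k : Nat) : Int) := by push_cast; ring
    rw [hp, PySem.Int.bor_of_nonneg hm (by positivity)]
    have hmt : m.toNat < 2 ^ k := by omega
    have hor : m.toNat ||| 2 ^ k = m.toNat + 2 ^ k := by
      rw [Nat.lor_comm]
      have := Nat.two_pow_add_eq_or_of_lt hmt 1
      simpa [Nat.add_comm] using this.symm
    rw [Int.toNat_natCast, hor]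
    push_cast
    omega

theorem msF_eq_msS (cs : List Int) : ∀ (k : Nat) (m : Int), 0 ≤ m → m < 2 ^ k →
    msF cs k m = m + msS cs k := by
  induction cs with
  | nil => intro k m _ _; simp [msF, msS]
  | cons b bs ih =>
    intro k m hm hlt
    have ht := bit01 b
    have hb : PySem.Int.bor m (((PySem.Int.band b 128) >>> 7) <<< k) =
        m + ((PySem.Int.band b 128) >>> 7) <<< k := bor_disjoint m _ k hm hlt ht
    have hsh : ((PySem.Int.band b 128) >>> 7) <<< k ≤ 2 ^ k := by
      rcases ht with h | h <;> rw [h] <;> simp [Int.shiftLeft_eq]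
    have hsh0 : 0 ≤ ((PySem.Int.band b 128) >>> 7) <<< k := by
      rcases ht with h | h <;> rw [h] <;> simp [Int.shiftLeft_eq]
    rw [msF, hb, ih (k + 1) _ (by omega) (by rw [pow_succ]; omega), msS]
    ring

theorem escA_ms_eq_msF (rest : List Int) : escA_ms rest = msF (rest.take 7) 0 0 := by
  rcases rest with _ | ⟨a1, _ | ⟨a2, _ | ⟨a3, _ | ⟨a4, _ | ⟨a5, _ | ⟨a6, _ | ⟨a7, t⟩⟩⟩⟩⟩⟩⟩ <;>
    simp [escA_ms, msF, List.range_succ]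

theorem escA_ms_eq (rest : List Int) : escA_ms rest = msS (rest.take 7) 0 := by
  rw [escA_ms_eq_msF, msF_eq_msS _ 0 0 le_rfl (by norm_num), zero_add]

theorem altMs_eq (chunk : List Int) : altMs chunk = msS chunk 0 := by
  have h : ∀ (cs : List Int) (s : Nat),
      ((PySem.List.enumerate cs (s : Int)).map
        (fun p => ((PySem.Int.band p.2 128) >>> 7) <<< p.1.toNat)).sum = msS cs s := by
    intro cs
    induction cs with
    | nil => intro s; simp [msS]
    | cons b bs ih =>
      intro s
      simp only [PySem.List.enumerate_cons, List.map_cons, List.sum_cons]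
      rw [show ((s : Int) + 1) = ((s + 1 : Nat) : Int) by push_cast; ring, ih (s + 1), msS]
      simp [Int.shiftLeft_natCast_right]
  have h0 := h chunk 0
  rw [show ((0 : Nat) : Int) = 0 from rfl] at h0
  exact h0

-- the common body: one block per chunk
def body (l : List Int) : List Int :=
  (chunks7 l).flatMap (fun c => msS c 0 :: c.map (fun b => PySem.Int.band b 127))

theorem escA_loop_eq (n : Nat) : ∀ (rest result : List Int) (chksum : Int), rest.length ≤ n →
    escA_loop rest result chksum = (result ++ body rest, chksum + (body rest).sum) := by
  induction n with
  | zero =>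
    intro rest result chksum h
    have : rest = [] := List.eq_nil_of_length_eq_zero (by omega)
    subst this
    simp [escA_loop, body, chunks7]
  | succ n ih =>
    intro rest result chksum h
    rcases rest with _ | ⟨b, bs⟩
    · simp [escA_loop, body, chunks7]
    · have hbody : body (b :: bs) =
          (msS ((b :: bs).take 7) 0 ::
            ((b :: bs).take 7).map (fun x => PySem.Int.band x 127)) ++ body ((b :: bs).drop 7) := by
        rw [body, chunks7_cons_eq (b :: bs) (by simp), List.flatMap_cons]
        rfl
      rw [escA_loop]
      simp only [escA_inner_spec]
      rw [ih ((b :: bs).drop 7) _ _ (by simp at h ⊢; omega), hbody, escA_ms_eq]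
      simp [List.append_assoc, List.sum_append]
      ring

theorem altChunks_eq (n : Nat) : ∀ (data : List Int) (i : Nat), data.length - i ≤ n →
    altChunks data i = chunks7 (data.drop i) := by
  induction n with
  | zero =>
    intro data i h
    rw [altChunks]
    have hd : data.drop i = [] := List.drop_eq_nil_of_le (by omega)
    simp [hd, chunks7, show ¬ i < data.length by omega]
  | succ n ih =>
    intro data i h
    rw [altChunks]
    by_cases hi : i < data.length
    · have hs : PySem.List.slice data (some (i : Int)) (some ((i : Int) + 7)) =
          (data.drop i).take 7 := by
        have := PySem.List.slice_natCast_add data i 7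
        simpa using this
      rw [if_pos hi, hs, ih data (i + 7) (by omega),
        chunks7_cons_eq (data.drop i) (by simp; omega)]
      simp [List.drop_drop]
    · have hd : data.drop i = [] := List.drop_eq_nil_of_le (by omega)
      simp [hd, chunks7, hi]

theorem alt_eq (data : List Int) : escapeSysexElektron_alt data = (body data, (body data).sum) := by
  unfold escapeSysexElektron_alt
  rw [altChunks_eq data.length data 0 (by omega)]
  simp only [List.drop_zero]
  have hf : (chunks7 data).foldl
      (fun acc chunk => (acc ++ [altMs chunk]) ++ chunk.map (fun b => PySem.Int.band b 127)) [] =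
      body data := by
    have h1 : ∀ acc : List Int, (chunks7 data).foldl
        (fun acc chunk => (acc ++ [altMs chunk]) ++ chunk.map (fun b => PySem.Int.band b 127)) acc =
        acc ++ (chunks7 data).flatMap
          (fun c => altMs c :: c.map (fun b => PySem.Int.band b 127)) := by
      intro acc
      have := PySem.List.foldl_append_eq_flatMap
        (fun c => altMs c :: c.map (fun b => PySem.Int.band b 127)) (chunks7 data) acc
      rw [show (fun (acc : List Int) chunk =>
          (acc ++ [altMs chunk]) ++ chunk.map (fun b => PySem.Int.band b 127)) =
          (fun acc chunk => acc ++ (altMs chunk :: chunk.map (fun b => PySem.Int.band b 127)))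
        from by funext acc c; simp]
      exact this
    rw [h1, body]
    simp [altMs_eq]
  rw [hf]

-- ===== VERDICT (by name: the statement is the Claim_ definition above) =====
theorem escapeSysexElektron_spec : Claim_equal_escapeSysexElektron := by
  intro data _
  unfold Spec_escapeSysexElektron
  rw [alt_eq]
  unfold escapeSysexElektron
  rw [escA_loop_eq data.length data [] 0 le_rfl]
  simp
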